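-- pv_equiv track=rewrite | github.com/Raptor56MTG/Jane-Street-Puzzles-2024 | 2024-mar/adjacent.py | adjacent_three_edge
-- ===== SOURCE A (Python) =====
-- def adjacent_three_edge(value: int) -> list[tuple[int]]:
--     """This function takes a number and outputs a list of possible
--     values of three different numbers 1 - 9 that can sum up to it. The sum
--     must be of the form x + y + z = value"""
--
--     valid_sums = []
--     for i in range(1, 10):
--         for j in range(i + 1,  10):
--             for k in range(j + 1, 10):
--                 if i + j + k == value:
--                     valid_sums.append([i, j, k])
--     return valid_sums
-- ===== SOURCE B (Python) =====
-- def adjacent_three_edge(value: int) -> list[tuple[int]]: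
--     """For each pair i < j, the third number is forced: k = value - i - j.
--     Keep it only when j < k <= 9, which guarantees distinctness and order."""
--     return [[i, j, value - i - j]
--             for i in range(1, 10)
--             for j in range(i + 1, 10)
--             if j < value - i - j <= 9]
-- ===== Notes on version B (the rewrite author's own statement) =====
-- stated objective: simpler
-- what changed: B drops A's innermost loop: for each pair (i,j) the third summand is computed directly as k = value-i-j and kept iff j < k <= 9, building the list with a comprehension instead of triple nested loops with append.
import Mathlib
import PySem

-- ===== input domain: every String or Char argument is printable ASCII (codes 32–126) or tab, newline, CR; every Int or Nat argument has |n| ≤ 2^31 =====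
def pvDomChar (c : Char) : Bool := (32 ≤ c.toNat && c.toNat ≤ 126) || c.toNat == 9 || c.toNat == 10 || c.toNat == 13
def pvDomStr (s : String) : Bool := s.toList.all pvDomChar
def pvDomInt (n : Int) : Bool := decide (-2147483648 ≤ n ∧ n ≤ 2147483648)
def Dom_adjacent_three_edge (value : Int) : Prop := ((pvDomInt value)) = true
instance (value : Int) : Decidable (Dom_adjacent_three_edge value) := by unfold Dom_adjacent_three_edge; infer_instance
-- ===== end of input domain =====

-- B replaces A's innermost loop by the forced value k = value - i - j (kept iff j < k ≤ 9),
-- building the result by a comprehension over pairs instead of triple nested loops with append.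

-- ===== PORT A =====
def adjacent_three_edge (value : Int) : List (List Int) :=
  (PySem.List.pyRange 1 10 1).foldl (fun acc i =>
    (PySem.List.pyRange (i + 1) 10 1).foldl (fun acc j =>
      (PySem.List.pyRange (j + 1) 10 1).foldl (fun acc k =>
        if i + j + k = value then acc ++ [[i, j, k]] else acc) acc) acc) []

-- ===== PORT B =====
def adjacent_three_edge_alt (value : Int) : List (List Int) :=
  (PySem.List.pyRange 1 10 1).flatMap (fun i =>
    ((PySem.List.pyRange (i + 1) 10 1).filter
        (fun j => decide (j < value - i - j ∧ value - i - j ≤ 9))).map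
      (fun j => [i, j, value - i - j]))

-- ===== PRECONDITION & SPEC =====
def Spec_adjacent_three_edge (value : Int) (out : List (List Int)) : Prop := out = adjacent_three_edge_alt value
instance (value : Int) (out : List (List Int)) : Decidable (Spec_adjacent_three_edge value out) := by unfold Spec_adjacent_three_edge; infer_instance

-- ===== CLAIM (what is proved, stated in full; the proofs are below) =====
def Claim_equal_adjacent_three_edge : Prop := ∀ (value : Int), Dom_adjacent_three_edge value → Spec_adjacent_three_edge value (adjacent_three_edge value)

-- ===== LEMMAS AND PROOFS =====

-- filtering a unit-step range by equality with t yields [t] iff t is in range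
lemma filter_eq_pyRange (a b t : Int) :
    (PySem.List.pyRange a b 1).filter (fun k => decide (k = t)) =
      if a ≤ t ∧ t < b then [t] else [] := by
  by_cases h : b ≤ a
  · rw [PySem.List.pyRange_one_eq_nil h]
    simp only [List.filter_nil]
    rw [if_neg (by omega)]
  · rw [PySem.List.pyRange_one_cons (by omega)]
    have ih := filter_eq_pyRange (a + 1) b t
    simp only [List.filter_cons, ih]
    split_ifs <;> simp_all <;> omega
termination_by (b - a).toNat
decreasing_by omega

-- A's innermost loop over k collapses to the single forced candidate k = value - i - j
lemma innerA (value i j : Int) (acc : List (List Int)) :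
    (PySem.List.pyRange (j + 1) 10 1).foldl (fun acc k =>
        if i + j + k = value then acc ++ [[i, j, k]] else acc) acc =
      acc ++ (if j < value - i - j ∧ value - i - j ≤ 9
              then [[i, j, value - i - j]] else []) := by
  rw [PySem.List.foldl_append_ite (p := fun k => i + j + k = value) (f := fun k => [i, j, k])]
  rw [List.filter_congr (q := fun k => decide (k = value - i - j))
      (fun x _ => by simp only [decide_eq_decide]; omega)]
  rw [filter_eq_pyRange]
  by_cases h : j + 1 ≤ value - i - j ∧ value - i - j < 10
  · rw [if_pos h, if_pos (by omega)]; simp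
  · rw [if_neg h, if_neg (by omega)]; simp

-- A's middle loop becomes a flatMap of the collapsed inner loop
lemma midA (value i : Int) (acc : List (List Int)) :
    (PySem.List.pyRange (i + 1) 10 1).foldl (fun acc j =>
        (PySem.List.pyRange (j + 1) 10 1).foldl (fun acc k =>
          if i + j + k = value then acc ++ [[i, j, k]] else acc) acc) acc =
      acc ++ (PySem.List.pyRange (i + 1) 10 1).flatMap (fun j =>
        if j < value - i - j ∧ value - i - j ≤ 9
        then [[i, j, value - i - j]] else []) := by
  have hf : (fun (acc : List (List Int)) j =>
      (PySem.List.pyRange (j + 1) 10 1).foldl (fun acc k =>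
        if i + j + k = value then acc ++ [[i, j, k]] else acc) acc) =
      (fun acc j => acc ++ (if j < value - i - j ∧ value - i - j ≤ 9
                            then [[i, j, value - i - j]] else [])) := by
    funext acc j; exact innerA value i j acc
  rw [hf, PySem.List.foldl_append_eq_flatMap]

-- filter-then-map as a flatMap with an if
lemma filter_map_eq_flatMap (l : List Int) (p : Int → Bool) (f : Int → List Int) :
    (l.filter p).map f = l.flatMap (fun x => if p x then [f x] else []) := by
  induction l with
  | nil => rfl
  | cons x xs ih =>
    by_cases h : p x
    · simp [h, ih]
    · simp [h, ih]

-- ===== VERDICT (by name: the statement is the Claim_ definition above) =====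
theorem adjacent_three_edge_spec : Claim_equal_adjacent_three_edge := by
  intro value _
  unfold Spec_adjacent_three_edge adjacent_three_edge adjacent_three_edge_alt
  have hf : (fun (acc : List (List Int)) i =>
      (PySem.List.pyRange (i + 1) 10 1).foldl (fun acc j =>
        (PySem.List.pyRange (j + 1) 10 1).foldl (fun acc k =>
          if i + j + k = value then acc ++ [[i, j, k]] else acc) acc) acc) =
      (fun acc i => acc ++ (PySem.List.pyRange (i + 1) 10 1).flatMap (fun j =>
        if j < value - i - j ∧ value - i - j ≤ 9
        then [[i, j, value - i - j]] else [])) := by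
    funext acc i; exact midA value i acc
  rw [hf, PySem.List.foldl_append_eq_flatMap, List.nil_append]
  congr 1
  funext i
  rw [filter_map_eq_flatMap]
  simp only [decide_eq_true_eq]
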